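-- pv_equiv track=rewrite | github.com/BARHOUMIAmeur/data-pipeline-project | pipeline_donnees/queries.py | related_drugs_by_journal
-- ===== SOURCE A (Python) =====
-- def related_drugs_by_journal(data, target_drug):
--     # Ensemble pour stocker les journaux où le médicament cible est mentionné
--     target_journals = set()
--
--     # Trouver les journaux qui mentionnent le médicament cible
--     for mention in data.get(target_drug, []):
--         target_journals.add(mention['journal'])
--     # Ensemble pour stocker tous les autres médicaments mentionnés dans les mêmes journaux
--     related_drugs = set()
--     # Parcourir à nouveau pour trouver les autres médicaments mentionnés dans ces journaux
--     for drug, mentions in data.items():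
--         if drug != target_drug:  # Éviter d'ajouter le médicament cible
--             for mention in mentions:
--                 if mention['journal'] in target_journals:
--                     related_drugs.add(drug)
--
--     return related_drugs
-- ===== SOURCE B (Python) =====
-- def related_drugs_by_journal(data, target_drug):
--     # Inverted index: journal -> set of drugs having at least one mention in it.
--     index = {}
--     for drug, mentions in data.items():
--         for mention in mentions:
--             index.setdefault(mention['journal'], set()).add(drug)
--     # Union of the index entries for the target's journals.
--     hits = set()
--     for mention in data.get(target_drug, []):
--         hits |= index.get(mention['journal'], set())
--     # Every drug other than the target that got a hit.
--     return {drug for drug in data if drug != target_drug and drug in hits}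
-- ===== Notes on version B (the rewrite author's own statement) =====
-- stated objective: alternative
-- what changed: B replaces A's scan of every drug with a per-mention membership test by a one-pass inverted index journal->set-of-drugs, then unions the index entries of the target's journals and keeps every non-target drug that was hit; same asymptotic cost, different data structure and traversal.
import Mathlib
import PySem

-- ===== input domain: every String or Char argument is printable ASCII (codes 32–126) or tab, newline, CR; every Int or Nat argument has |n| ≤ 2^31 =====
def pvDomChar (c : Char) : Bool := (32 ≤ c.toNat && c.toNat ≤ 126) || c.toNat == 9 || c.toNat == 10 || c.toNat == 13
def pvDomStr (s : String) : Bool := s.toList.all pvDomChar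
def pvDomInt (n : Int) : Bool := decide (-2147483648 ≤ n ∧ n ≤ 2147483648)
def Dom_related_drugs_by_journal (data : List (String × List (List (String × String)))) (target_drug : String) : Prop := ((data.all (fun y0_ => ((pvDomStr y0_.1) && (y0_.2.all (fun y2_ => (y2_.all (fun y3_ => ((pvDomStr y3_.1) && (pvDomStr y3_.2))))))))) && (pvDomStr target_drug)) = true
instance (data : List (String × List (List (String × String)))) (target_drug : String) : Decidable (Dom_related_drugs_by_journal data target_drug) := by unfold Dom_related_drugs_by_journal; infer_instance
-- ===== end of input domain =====

-- B replaces A's "scan every drug, test each mention's journal against the target's journal set"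
-- by an inverted index journal -> set of drugs, union over the target's journals (alternative
-- decomposition, same asymptotic cost). Equivalence of the RETURN value is proved on Pre_.

-- mention['journal'] on a mention dict (total form; Pre_ guarantees the key is present)
def pvJournal (m : List (String × String)) : String :=
  (PySem.Dict.ofList m).getD "journal" ""

-- ===== PORT A =====
def related_drugs_by_journal (data : List (String × List (List (String × String)))) (target_drug : String) : List String :=
  let d := PySem.Dict.ofList data
  -- target_journals = set(); for mention in data.get(target_drug, []): target_journals.add(mention['journal'])
  let target_journals : PySem.Set String :=
    (d.getD target_drug []).foldl (fun s m => PySem.Set.add s (pvJournal m)) PySem.Set.empty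
  -- related_drugs = set(); for drug, mentions in data.items(): ...
  d.items.foldl
    (fun related p =>
      if p.1 ≠ target_drug then
        p.2.foldl
          (fun related m =>
            if PySem.Set.contains target_journals (pvJournal m) then PySem.Set.add related p.1
            else related)
          related
      else related)
    PySem.Set.empty

-- ===== PORT B =====
def related_drugs_by_journal_alt (data : List (String × List (List (String × String)))) (target_drug : String) : List String :=
  let d := PySem.Dict.ofList data
  -- index = {}; for drug, mentions in data.items(): for mention in mentions: index.setdefault(j, set()).add(drug)
  let index : PySem.Dict String (PySem.Set String) :=
    d.items.foldl
      (fun ix p =>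
        p.2.foldl
          (fun ix m => ix.modify (pvJournal m) PySem.Set.empty (fun s => PySem.Set.add s p.1))
          ix)
      PySem.Dict.empty
  -- hits = set(); for mention in data.get(target_drug, []): hits |= index.get(j, set())
  let hits : PySem.Set String :=
    (d.getD target_drug []).foldl
      (fun h m => PySem.Set.union h (index.getD (pvJournal m) PySem.Set.empty))
      PySem.Set.empty
  -- return {drug for drug in data if drug != target_drug and drug in hits}
  PySem.Set.ofList
    (d.keys.filter (fun drug => (drug != target_drug) && PySem.Set.contains hits drug))

-- ===== PRECONDITION & SPEC =====
-- Pre_ excludes exactly the inputs on which A raises KeyError: a mention dict without the 'journal' key.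
def Pre_related_drugs_by_journal (data : List (String × List (List (String × String)))) (target_drug : String) : Prop :=
  ∀ p ∈ (PySem.Dict.ofList data).items, ∀ m ∈ p.2,
    (PySem.Dict.ofList m).contains "journal" = true
instance (data : List (String × List (List (String × String)))) (target_drug : String) : Decidable (Pre_related_drugs_by_journal data target_drug) := by unfold Pre_related_drugs_by_journal; infer_instance

def pvWitness_related_drugs_by_journal : (List (String × List (List (String × String)))) × String :=
  ([("aspirin", [[("journal", "J1")]]), ("ibuprofen", [[("journal", "J1")]])], "aspirin")

def Spec_related_drugs_by_journal (data : List (String × List (List (String × String)))) (target_drug : String) (out : List String) : Prop := out = related_drugs_by_journal_alt data target_drug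
instance (data : List (String × List (List (String × String)))) (target_drug : String) (out : List String) : Decidable (Spec_related_drugs_by_journal data target_drug out) := by unfold Spec_related_drugs_by_journal; infer_instance

-- ===== CLAIM (what is proved, stated in full; the proofs are below) =====
def Claim_equal_related_drugs_by_journal : Prop := ∀ (data : List (String × List (List (String × String)))) (target_drug : String), Dom_related_drugs_by_journal data target_drug → Pre_related_drugs_by_journal data target_drug → Spec_related_drugs_by_journal data target_drug (related_drugs_by_journal data target_drug)


-- ===== LEMMAS AND PROOFS =====

-- Set.add is idempotent
theorem pv_add_add (s : PySem.Set String) (x : String) :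
    PySem.Set.add (PySem.Set.add s x) x = PySem.Set.add s x :=
  PySem.Set.add_of_mem (by simp [PySem.Set.mem_add])

-- A's inner loop: scanning the mentions of one drug either adds the drug once or not at all
theorem pv_innerA (tj : PySem.Set String) (k : String) :
    ∀ (ms : List (List (String × String))) (rd : PySem.Set String),
      ms.foldl (fun rd m => if PySem.Set.contains tj (pvJournal m) then PySem.Set.add rd k else rd) rd
        = if ms.any (fun m => PySem.Set.contains tj (pvJournal m)) then PySem.Set.add rd k else rd := by
  intro ms
  induction ms with
  | nil => intro rd; simp
  | cons m ms ih =>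
    intro rd
    rw [List.foldl_cons]
    by_cases h : PySem.Set.contains tj (pvJournal m) = true
    all_goals by_cases h2 : (ms.any fun m => PySem.Set.contains tj (pvJournal m)) = true
    · rw [if_pos h, ih, if_pos h2, pv_add_add,
        if_pos (by simp only [List.any_cons, Bool.or_eq_true]; tauto)]
    · rw [if_pos h, ih, if_neg h2,
        if_pos (by simp only [List.any_cons, Bool.or_eq_true]; tauto)]
    · rw [if_neg h, ih, if_pos h2,
        if_pos (by simp only [List.any_cons, Bool.or_eq_true]; tauto)]
    · rw [if_neg h, ih, if_neg h2,
        if_neg (by simp only [List.any_cons, Bool.or_eq_true]; tauto)]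

-- A's outer loop appends, in data order, the keys of the qualifying items
theorem pv_outerA (tj : PySem.Set String) (t : String) :
    ∀ (items : List (String × List (List (String × String)))) (rd : PySem.Set String),
      (items.map Prod.fst).Nodup → (∀ p ∈ items, p.1 ∉ rd) →
      items.foldl
        (fun related p =>
          if p.1 ≠ t then
            p.2.foldl (fun related m =>
              if PySem.Set.contains tj (pvJournal m) then PySem.Set.add related p.1 else related) related
          else related) rd
        = rd ++ (items.filter
            (fun p => decide (p.1 ≠ t) && p.2.any (fun m => PySem.Set.contains tj (pvJournal m)))).map Prod.fst := by
  intro items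
  induction items with
  | nil => intro rd _ _; simp
  | cons p items ih =>
    intro rd hnd hnin
    have hndtl : (items.map Prod.fst).Nodup := by simpa using hnd.of_cons
    have hp1 : p.1 ∉ rd := hnin p (List.mem_cons_self ..)
    rw [List.foldl_cons]
    by_cases ht : p.1 ≠ t
    · rw [if_pos ht, pv_innerA]
      by_cases hany : (p.2.any (fun m => PySem.Set.contains tj (pvJournal m))) = true
      · rw [if_pos hany, PySem.Set.add_of_not_mem hp1,
          ih (rd ++ [p.1]) hndtl ?_, List.filter_cons_of_pos (by simp only [Bool.and_eq_true, decide_eq_true_eq]; exact ⟨ht, hany⟩)]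
        · simp
        · intro q hq
          simp only [List.mem_append, List.mem_singleton]
          rintro (h | h)
          · exact hnin q (List.mem_cons_of_mem _ hq) h
          · have hmem : p.1 ∈ items.map Prod.fst := List.mem_map.2 ⟨q, hq, h⟩
            simp only [List.map_cons, List.nodup_cons] at hnd
            exact hnd.1 hmem
      · rw [if_neg hany, ih rd hndtl (fun q hq => hnin q (List.mem_cons_of_mem _ hq)),
          List.filter_cons_of_neg (by simp only [Bool.and_eq_true, decide_eq_true_eq]; exact fun hc => hany hc.2)]
    · rw [if_neg ht, ih rd hndtl (fun q hq => hnin q (List.mem_cons_of_mem _ hq)),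
        List.filter_cons_of_neg (by simp only [Bool.and_eq_true, decide_eq_true_eq]; exact fun hc => ht hc.1)]

-- nested loop over items = loop over the flattened event list
theorem pv_nested_foldl {α β γ : Type} (g : α → List β) (f : γ → β → γ) :
    ∀ (l : List α) (a : γ),
      l.foldl (fun a p => (g p).foldl f a) a = (l.flatMap g).foldl f a := by
  intro l
  induction l with
  | nil => intro a; simp
  | cons p l ih => intro a; simp [List.foldl_append, ih]

-- membership in the inverted index built by the modify loop
theorem pv_mem_index :
    ∀ (events : List (String × String)) (ix0 : PySem.Dict String (PySem.Set String)) (j x : String),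
      (x ∈ (events.foldl
        (fun ix e => ix.modify e.1 PySem.Set.empty (fun s => PySem.Set.add s e.2)) ix0).getD j PySem.Set.empty)
      ↔ x ∈ ix0.getD j PySem.Set.empty ∨ ∃ e ∈ events, e.1 = j ∧ e.2 = x := by
  intro events
  induction events with
  | nil => intro ix0 j x; simp
  | cons e events ih =>
    intro ix0 j x
    rw [List.foldl_cons, ih]
    rw [PySem.Dict.getD_modify]
    by_cases hj : j = e.1
    · subst hj
      simp [PySem.Set.mem_add]
      tauto
    · rw [if_neg hj]
      constructor
      · rintro (h | ⟨e', he', h1, h2⟩)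
        · exact Or.inl h
        · exact Or.inr ⟨e', List.mem_cons_of_mem _ he', h1, h2⟩
      · rintro (h | ⟨e', he', h1, h2⟩)
        · exact Or.inl h
        · rcases List.mem_cons.1 he' with h | h
          · subst h; exact absurd h1.symm hj
          · exact Or.inr ⟨e', h, h1, h2⟩

-- membership in the union loop over the target's mentions
theorem pv_mem_hits (index : PySem.Dict String (PySem.Set String)) :
    ∀ (tms : List (List (String × String))) (h0 : PySem.Set String) (x : String),
      (x ∈ tms.foldl (fun h m => PySem.Set.union h (index.getD (pvJournal m) PySem.Set.empty)) h0)
      ↔ x ∈ h0 ∨ ∃ m ∈ tms, x ∈ index.getD (pvJournal m) PySem.Set.empty := by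
  intro tms
  induction tms with
  | nil => intro h0 x; simp
  | cons m tms ih =>
    intro h0 x
    rw [List.foldl_cons, ih]
    simp [PySem.Set.mem_union]
    tauto

-- pushing map fst through a filter on the key
theorem pv_map_fst_filter {α β : Type} (q : α → Bool) :
    ∀ (l : List (α × β)), (l.filter (fun p => q p.1)).map Prod.fst = (l.map Prod.fst).filter q := by
  intro l
  induction l with
  | nil => rfl
  | cons p l ih =>
    by_cases h : q p.1 = true
    · simp [h, ih]
    · simp [h, ih]


-- membership in the inverted index as built by B's nested loop
theorem pv_mem_index' (items : List (String × List (List (String × String)))) (j x : String) :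
    (x ∈ (items.foldl
        (fun ix p => p.2.foldl
          (fun ix m => ix.modify (pvJournal m) PySem.Set.empty (fun s => PySem.Set.add s p.1)) ix)
        PySem.Dict.empty).getD j PySem.Set.empty)
    ↔ ∃ p ∈ items, ∃ m ∈ p.2, pvJournal m = j ∧ p.1 = x := by
  have h1 : items.foldl
      (fun ix p => p.2.foldl
        (fun ix m => ix.modify (pvJournal m) PySem.Set.empty (fun s => PySem.Set.add s p.1)) ix)
      PySem.Dict.empty
    = (items.flatMap (fun p => p.2.map (fun m => (pvJournal m, p.1)))).foldl
        (fun ix e => ix.modify e.1 PySem.Set.empty (fun s => PySem.Set.add s e.2)) PySem.Dict.empty := by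
    rw [← pv_nested_foldl]
    congr 1
    funext ix p
    rw [List.foldl_map]
  rw [h1, pv_mem_index]
  rw [PySem.Dict.getD_empty]
  simp only [List.mem_flatMap, List.mem_map, PySem.Set.empty, List.not_mem_nil, false_or]
  constructor
  · rintro ⟨e, ⟨p, hp, m, hm, rfl⟩, h1, h2⟩
    exact ⟨p, hp, m, hm, h1, h2⟩
  · rintro ⟨p, hp, m, hm, h1, h2⟩
    exact ⟨(pvJournal m, p.1), ⟨p, hp, m, hm, rfl⟩, h1, h2⟩

-- ===== VERDICT (by name: the statement is the Claim_ definition above) =====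
theorem related_drugs_by_journal_spec : Claim_equal_related_drugs_by_journal := by
  intro data t _dom _pre
  unfold Spec_related_drugs_by_journal
  have hnd : (PySem.Dict.ofList data).keys.Nodup := PySem.Dict.nodup_keys_ofList data
  simp only [related_drugs_by_journal, related_drugs_by_journal_alt]
  generalize hD : PySem.Dict.ofList data = d at hnd ⊢
  have hnd1 : (d.items.map Prod.fst).Nodup := by simpa only [PySem.Dict.keys] using hnd
  rw [pv_outerA _ t d.items PySem.Set.empty hnd1
        (by intro q hq h; simp [PySem.Set.empty] at h)]
  have huniq : ∀ p ∈ d.items, ∀ p' ∈ d.items, p'.1 = p.1 → p' = p := by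
    rintro ⟨a, b⟩ hp ⟨a', b'⟩ hp' h1
    cases h1
    have e1 : d.get? a = some b := PySem.Dict.get?_of_mem_items d hp hnd
    have e2 : d.get? a = some b' := PySem.Dict.get?_of_mem_items d hp' hnd
    rw [e1] at e2
    cases e2
    rfl
  have hpt : ∀ p ∈ d.items,
      (decide (p.1 ≠ t) && p.2.any (fun m => PySem.Set.contains
          ((d.getD t []).foldl (fun s m => PySem.Set.add s (pvJournal m)) PySem.Set.empty)
          (pvJournal m)))
      = ((p.1 != t) && PySem.Set.contains
          ((d.getD t []).foldl
            (fun h m => PySem.Set.union h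
              ((d.items.foldl
                  (fun ix p => p.2.foldl
                    (fun ix m => ix.modify (pvJournal m) PySem.Set.empty
                      (fun s => PySem.Set.add s p.1)) ix)
                  PySem.Dict.empty).getD (pvJournal m) PySem.Set.empty))
            PySem.Set.empty) p.1) := by
    intro p hp
    have c1 : decide (p.1 ≠ t) = (p.1 != t) := by rw [Bool.eq_iff_iff, decide_eq_true_eq, bne_iff_ne]
    have c2 : (p.2.any (fun m => PySem.Set.contains
          ((d.getD t []).foldl (fun s m => PySem.Set.add s (pvJournal m)) PySem.Set.empty)
          (pvJournal m)))
        = PySem.Set.contains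
          ((d.getD t []).foldl
            (fun h m => PySem.Set.union h
              ((d.items.foldl
                  (fun ix p => p.2.foldl
                    (fun ix m => ix.modify (pvJournal m) PySem.Set.empty
                      (fun s => PySem.Set.add s p.1)) ix)
                  PySem.Dict.empty).getD (pvJournal m) PySem.Set.empty))
            PySem.Set.empty) p.1 := by
      rw [Bool.eq_iff_iff, List.any_eq_true, PySem.Set.contains_iff, pv_mem_hits]
      simp only [pv_mem_index', PySem.Set.contains_iff, PySem.Set.mem_foldl_add]
      simp only [PySem.Set.empty, List.not_mem_nil, false_or]
      constructor
      · rintro ⟨m', hm', b, hb, heq⟩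
        exact ⟨b, hb, p, hp, m', hm', heq, rfl⟩
      · rintro ⟨m, hm, p', hp', m', hm', h1, h2⟩
        have hpp := huniq p hp p' hp' h2
        subst hpp
        exact ⟨m', hm', m, hm, h1⟩
    rw [c1, c2]
  rw [List.filter_congr hpt]
  have hkeys : d.keys = d.items.map Prod.fst := rfl
  refine Eq.trans ?_ (PySem.Set.ofList_eq_self_of_nodup _ (List.Nodup.filter _ hnd)).symm
  rw [hkeys]
  simp only [PySem.Set.empty, List.nil_append]
  exact pv_map_fst_filter
    (fun drug => (drug != t) &&
      PySem.Set.contains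
        ((d.getD t []).foldl
          (fun h m => PySem.Set.union h
            ((d.items.foldl
                (fun ix p => p.2.foldl
                  (fun ix m => ix.modify (pvJournal m) PySem.Set.empty
                    (fun s => PySem.Set.add s p.1)) ix)
                PySem.Dict.empty).getD (pvJournal m) PySem.Set.empty))
          PySem.Set.empty) drug) d.items
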